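-- pv_equiv track=rewrite | github.com/owenwu811/LeetCode-Solutions-Python- | numberofsubsequencesthatsatisfythegivensumcondition.py | numSubseq
-- ===== SOURCE A (Python) =====
-- from typing import List
--
-- def numSubseq(nums: List[int], target: int) -> int:
--     nums.sort()
--     l, r = 0, len(nums) - 1
--     res = 0
--     while l <= r:
--         cursum = nums[l] + nums[r]
--         if cursum > target:
--             r -= 1
--         elif cursum <= target:
--             res += (2 ** (r - l)) #the number of subsequences if 2 ** (r - l)!!!!
--             l += 1
--     return res % ((10 ** 9) + 7)
-- ===== SOURCE B (Python) =====
-- def _upper(s, i, target, n):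
--     # binary search: largest j in [i, n-1] with s[i] + s[j] <= target
--     # (caller guarantees j = i qualifies, so the answer exists)
--     lo, hi = i, n - 1
--     while lo < hi:
--         mid = (lo + hi + 1) // 2
--         if s[i] + s[mid] <= target:
--             lo = mid
--         else:
--             hi = mid - 1
--     return lo
--
-- def numSubseq(nums, target):
--     # sort a copy (A sorts in place), then for each minimum index i binary-search
--     # the largest valid maximum index; accumulate 2^(j-i) modulo 10^9+7
--     MOD = 10 ** 9 + 7
--     s = sorted(nums)
--     n = len(s)
--     res = 0
--     for i in range(n):
--         if s[i] + s[i] > target: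
--             break
--         j = _upper(s, i, target, n)
--         res = (res + pow(2, j - i, MOD)) % MOD
--     return res
-- ===== Notes on version B (the rewrite author's own statement) =====
-- stated objective: faster
-- what changed: B replaces A's shared two-pointer scan (accumulating exact big-integer powers 2**(r-l), reduced mod 10^9+7 once at the end) by an independent binary search per minimum index i for the largest valid maximum index, with modular accumulation via pow(2, k, MOD) at each step; B sorts a copy instead of in place.
import Mathlib
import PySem

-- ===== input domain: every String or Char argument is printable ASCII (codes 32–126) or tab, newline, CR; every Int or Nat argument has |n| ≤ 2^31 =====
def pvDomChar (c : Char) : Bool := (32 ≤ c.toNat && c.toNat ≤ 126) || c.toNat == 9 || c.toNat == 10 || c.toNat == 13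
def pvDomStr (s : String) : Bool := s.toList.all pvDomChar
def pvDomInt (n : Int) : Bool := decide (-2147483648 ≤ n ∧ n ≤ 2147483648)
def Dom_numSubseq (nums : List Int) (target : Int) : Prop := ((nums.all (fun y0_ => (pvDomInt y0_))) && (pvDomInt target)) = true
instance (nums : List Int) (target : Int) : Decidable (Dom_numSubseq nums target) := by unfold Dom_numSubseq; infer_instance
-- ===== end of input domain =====

-- B replaces A's shared two-pointer scan (exact bigint sums of 2**(r-l), reduced once at the end)
-- by an independent binary search per minimum index with modular accumulation; equivalence is
-- about the RETURN value only — A sorts nums in place, B sorts a copy.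

-- shared index helper: xs[i]; both Pythons only index with 0 ≤ i < len, so the .getD 0
-- default branch is unreachable (neither Python raises)
def pyAt (xs : List Int) (i : Int) : Int := (PySem.List.pyGet? xs i).getD 0

-- ===== PORT A =====
-- the while loop of A, totalised by a fuel counter (each iteration shrinks r+1-l by one, so
-- fuel = (r+1-l).toNat suffices and fuel 0 coincides with the l > r exit);
-- the 'elif cursum <= target' is the exact negation of the if-branch, ported as the else branch
def numSubseqLoopA (nums : List Int) (target : Int) : Nat → Int → Int → Int → Int
  | 0, _, _, res => res
  | fuel + 1, l, r, res =>
    if l ≤ r then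
      let cursum := pyAt nums l + pyAt nums r
      if cursum > target then numSubseqLoopA nums target fuel l (r - 1) res
      else numSubseqLoopA nums target fuel (l + 1) r (res + 2 ^ (r - l).toNat)
    else res

def numSubseq (nums : List Int) (target : Int) : Int :=
  let s := PySem.List.sorted nums (fun x => x) false
  numSubseqLoopA s target s.length 0 ((s.length : Int) - 1) 0 % (10 ^ 9 + 7)

-- ===== PORT B =====
-- the 'while lo < hi' binary search of _upper, totalised by fuel = (hi - lo).toNat
-- (each step strictly shrinks hi - lo; fuel 0 coincides with the lo ≥ hi exit)
def bSearch (s : List Int) (target i : Int) : Nat → Int → Int → Int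
  | 0, lo, _ => lo
  | fuel + 1, lo, hi =>
    if lo < hi then
      let mid := PySem.Int.floordiv (lo + hi + 1) 2
      if pyAt s i + pyAt s mid ≤ target then bSearch s target i fuel mid hi
      else bSearch s target i fuel lo (mid - 1)
    else lo

-- outer 'for i in range(n)' with break; pow(2, j-i, MOD) ported as 2 ^ (j-i) % (10^9+7)
def bOuter (s : List Int) (target : Int) (is : List Int) (res : Int) : Int :=
  match is with
  | [] => res
  | i :: rest =>
    if pyAt s i + pyAt s i > target then res
    else
      let j := bSearch s target i ((s.length : Int) - 1 - i).toNat i ((s.length : Int) - 1)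
      bOuter s target rest ((res + 2 ^ (j - i).toNat % (10 ^ 9 + 7)) % (10 ^ 9 + 7))

def numSubseq_alt (nums : List Int) (target : Int) : Int :=
  let s := PySem.List.sorted nums (fun x => x) false
  bOuter s target (PySem.List.pyRange 0 s.length 1) 0

-- ===== PRECONDITION & SPEC =====
def Spec_numSubseq (nums : List Int) (target : Int) (out : Int) : Prop := out = numSubseq_alt nums target
instance (nums : List Int) (target : Int) (out : Int) : Decidable (Spec_numSubseq nums target out) := by unfold Spec_numSubseq; infer_instance

-- ===== CLAIM (what is proved, stated in full; the proofs are below) =====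
def Claim_equal_numSubseq : Prop := ∀ (nums : List Int) (target : Int), Dom_numSubseq nums target → Spec_numSubseq nums target (numSubseq nums target)

-- ===== LEMMAS AND PROOFS =====

-- valid nonnegative index: pyAt is plain getElem
lemma pyAt_eq (s : List Int) (i : Int) (h0 : 0 ≤ i) (h : i < (s.length : Int)) :
    pyAt s i = s[i.toNat]'(by omega) := by
  obtain ⟨n, rfl⟩ : ∃ n : Nat, i = (n : Int) := ⟨i.toNat, by omega⟩
  unfold pyAt
  rw [PySem.List.pyGet?_natCast]
  simp [List.getElem?_eq_getElem (show n < s.length by omega)]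

-- monotone indexing hypothesis we thread around
def Mono (s : List Int) : Prop :=
  ∀ i j : Int, 0 ≤ i → i ≤ j → j < (s.length : Int) → pyAt s i ≤ pyAt s j

lemma mono_sorted (nums : List Int) : Mono (PySem.List.sorted nums (fun x => x) false) := by
  intro i j h0 hij hj
  rw [pyAt_eq _ i h0 (by omega), pyAt_eq _ j (by omega) hj]
  exact PySem.List.sorted_id_getElem_mono nums (by omega) (by omega)

-- binary-search postcondition: the result j is the last index ≤ hi still satisfying
-- pyAt s i + pyAt s · ≤ t (everything above it, up to the length, fails)
lemma bSearch_spec (s : List Int) (t i : Int) (hm : Mono s) :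
    ∀ (fuel : Nat) (lo hi : Int), (hi - lo).toNat ≤ fuel →
    0 ≤ i → i ≤ lo → lo ≤ hi → hi < (s.length : Int) →
    pyAt s i + pyAt s lo ≤ t →
    (∀ k, hi < k → k < (s.length : Int) → pyAt s i + pyAt s k > t) →
    lo ≤ bSearch s t i fuel lo hi ∧ bSearch s t i fuel lo hi ≤ hi ∧
      pyAt s i + pyAt s (bSearch s t i fuel lo hi) ≤ t ∧
      (∀ k, bSearch s t i fuel lo hi < k → k < (s.length : Int) →
        pyAt s i + pyAt s k > t) := by
  intro fuel
  induction fuel with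
  | zero =>
    intro lo hi hf h0 hil hlh hhn hpred hup
    have hle : lo = hi := by omega
    rw [bSearch]
    exact ⟨le_refl _, by omega, hpred, by intro k hk1 hk2; exact hup k (by omega) hk2⟩
  | succ fuel ih =>
    intro lo hi hf h0 hil hlh hhn hpred hup
    rw [bSearch]
    by_cases hlt : lo < hi
    · rw [if_pos hlt]
      have hb : lo + 1 ≤ PySem.Int.floordiv (lo + hi + 1) 2 ∧
          PySem.Int.floordiv (lo + hi + 1) 2 ≤ hi := by
        have h := PySem.Int.floordiv_two_mid_bounds (lo := lo + 1) (hi := hi) (by omega)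
        rwa [show lo + 1 + hi = lo + hi + 1 by ring] at h
      set mid := PySem.Int.floordiv (lo + hi + 1) 2 with hmid
      by_cases hp : pyAt s i + pyAt s mid ≤ t
      · rw [if_pos hp]
        have h := ih mid hi (by omega) h0 (by omega) (by omega) hhn hp hup
        exact ⟨by omega, h.2.1, h.2.2.1, h.2.2.2⟩
      · rw [if_neg hp]
        have hup' : ∀ k, mid - 1 < k → k < (s.length : Int) → pyAt s i + pyAt s k > t := by
          intro k hk1 hk2
          have hmk : pyAt s mid ≤ pyAt s k := hm mid k (by omega) (by omega) hk2
          omega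
        have h := ih lo (mid - 1) (by omega) h0 hil (by omega) (by omega) hpred hup'
        exact ⟨h.1, by omega, h.2.2.1, h.2.2.2⟩
    · rw [if_neg hlt]
      have hle : lo = hi := by omega
      exact ⟨le_refl _, by omega, hpred, by intro k hk1 hk2; exact hup k (by omega) hk2⟩

-- lockstep: A's while loop (mod p) equals B's per-index binary-search loop from position l,
-- under the two-pointer invariant that every index above r is already known invalid for l
lemma key (s : List Int) (t : Int) (hm : Mono s) : ∀ (fuel : Nat) (l r res : Int),
    fuel = (r + 1 - l).toNat →
    0 ≤ l → l ≤ r + 1 → r < (s.length : Int) →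
    (∀ k, r < k → k < (s.length : Int) → pyAt s l + pyAt s k > t) →
    numSubseqLoopA s t fuel l r res % (10 ^ 9 + 7)
      = bOuter s t (PySem.List.pyRange l s.length 1) (res % (10 ^ 9 + 7)) := by
  intro fuel
  induction fuel with
  | zero =>
    intro l r res hf h0 hlr hrn hinv
    rw [numSubseqLoopA]
    by_cases hln : l < (s.length : Int)
    · rw [PySem.List.pyRange_one_cons hln, bOuter,
        if_pos (hinv l (by omega) hln)]
    · rw [PySem.List.pyRange_one_eq_nil (by omega), bOuter]
  | succ fuel ih =>
    intro l r res hf h0 hlr hrn hinv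
    rw [numSubseqLoopA]
    by_cases hle : l ≤ r
    · rw [if_pos hle]
      have hln : l < (s.length : Int) := by omega
      by_cases hgt : pyAt s l + pyAt s r > t
      · rw [if_pos hgt]
        refine ih l (r - 1) res (by omega) h0 (by omega) (by omega) ?_
        intro k hk1 hk2
        by_cases hkr : k = r
        · rw [hkr]; exact hgt
        · exact hinv k (by omega) hk2
      · rw [if_neg hgt]
        have hlsum : pyAt s l + pyAt s l ≤ t := by
          have := hm l r h0 hle hrn; omega
        rw [PySem.List.pyRange_one_cons hln, bOuter, if_neg (by omega)]
        have hbs := bSearch_spec s t l hm (((s.length : Int) - 1 - l).toNat) l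
          ((s.length : Int) - 1) (le_refl _) h0 (le_refl _) (by omega) (by omega)
          hlsum (by intro k hk1 hk2; omega)
        set j := bSearch s t l (((s.length : Int) - 1 - l).toNat) l ((s.length : Int) - 1)
          with hj
        have hjr : j = r := by
          rcases hbs with ⟨hj1, hj2, hj3, hj4⟩
          by_contra hne
          rcases lt_or_gt_of_ne hne with hlt | hgt'
          · have := hj4 r hlt hrn; omega
          · have := hinv j hgt' (by omega); omega
        rw [ih (l + 1) r (res + 2 ^ (r - l).toNat) (by omega) (by omega) (by omega) hrn
          ?_]
        · rw [hjr, Int.add_emod res]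
        · intro k hk1 hk2
          have h1 : pyAt s l ≤ pyAt s (l + 1) := hm l (l + 1) h0 (by omega) (by omega)
          have h2 := hinv k hk1 hk2
          omega
    · rw [if_neg hle]
      by_cases hln : l < (s.length : Int)
      · rw [PySem.List.pyRange_one_cons hln, bOuter,
          if_pos (hinv l (by omega) hln)]
      · rw [PySem.List.pyRange_one_eq_nil (by omega), bOuter]

-- ===== VERDICT (by name: the statement is the Claim_ definition above) =====
theorem numSubseq_spec : Claim_equal_numSubseq := by
  intro nums target _
  unfold Spec_numSubseq numSubseq numSubseq_alt
  have h := key (PySem.List.sorted nums (fun x => x) false) target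
    (mono_sorted nums) (PySem.List.sorted nums (fun x => x) false).length 0
    (((PySem.List.sorted nums (fun x => x) false).length : Int) - 1) 0 (by omega)
    (by omega) (by omega) (by omega) (by intro k h1 h2; omega)
  simpa using h
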